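-- pv_equiv track=rewrite | github.com/li1365/NLP | eval_glove.py | tokensWithUnk
-- ===== SOURCE A (Python) =====
-- import random, string, copy
--
-- def tokensWithUnk(tokens):
--   tokens_used = set()
--   tokens_unk = copy.deepcopy(tokens)
--   for i in range(len(tokens_unk)):
--     if tokens_unk[i] not in tokens_used:
--       tokens_used.add(tokens_unk[i])
--       tokens_unk[i] = u'UNK'
--   return tokens_unk
-- ===== SOURCE B (Python) =====
-- import copy
--
-- def tokensWithUnk(tokens):
--   # pass 1: collect the indices that are the first occurrence of each distinct token
--   seen = set()
--   first_idx = set()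
--   for i, t in enumerate(tokens):
--     if t not in seen:
--       seen.add(t)
--       first_idx.add(i)
--   # pass 2: build the output without mutating the input
--   return [u'UNK' if i in first_idx else copy.deepcopy(t) for i, t in enumerate(tokens)]
-- ===== Notes on version B (the rewrite author's own statement) =====
-- stated objective: alternative
-- what changed: Instead of deep-copying the input and mutating it in place while scanning by index, B first collects the set of first-occurrence indices and then builds a fresh output list by comprehension; the input is never mutated.
import Mathlib
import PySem

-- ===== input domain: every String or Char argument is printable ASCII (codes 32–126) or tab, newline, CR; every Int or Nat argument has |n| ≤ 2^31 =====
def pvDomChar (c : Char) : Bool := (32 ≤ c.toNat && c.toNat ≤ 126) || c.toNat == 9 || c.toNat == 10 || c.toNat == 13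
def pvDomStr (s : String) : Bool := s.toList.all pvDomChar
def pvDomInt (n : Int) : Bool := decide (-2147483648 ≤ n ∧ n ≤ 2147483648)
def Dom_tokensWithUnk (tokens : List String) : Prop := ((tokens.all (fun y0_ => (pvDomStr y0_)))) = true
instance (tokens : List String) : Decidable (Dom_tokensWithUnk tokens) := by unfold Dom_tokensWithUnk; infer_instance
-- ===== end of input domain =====

-- B replaces A's deepcopy-and-mutate index scan with a two-pass build (collect first-occurrence
-- indices, then construct a fresh list), never mutating its input: an alternative decomposition.


-- ===== PORT A =====
-- deepcopy of immutable strings = the same list value; the loop mutates tokens_unk in place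
def tokensWithUnk (tokens : List String) : List String :=
  let tokens_unk := tokens
  ((PySem.List.pyRange 0 (tokens_unk.length : Int) 1).foldl
    (fun (st : PySem.Set String × List String) i =>
      let t := PySem.List.pyGetD st.2 i ""
      if st.1.contains t then st
      else (st.1.add t, PySem.List.pySetD st.2 i "UNK"))
    (PySem.Set.empty, tokens_unk)).2

-- ===== PORT B =====
def tokensWithUnk_alt (tokens : List String) : List String :=
  let st := (PySem.List.enumerate tokens).foldl
    (fun (st : PySem.Set String × PySem.Set Int) it =>
      if st.1.contains it.2 then st
      else (st.1.add it.2, st.2.add it.1))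
    (PySem.Set.empty, PySem.Set.empty)
  (PySem.List.enumerate tokens).map (fun it => if st.2.contains it.1 then "UNK" else it.2)

-- ===== PRECONDITION & SPEC =====
def Spec_tokensWithUnk (tokens : List String) (out : List String) : Prop := out = tokensWithUnk_alt tokens
instance (tokens : List String) (out : List String) : Decidable (Spec_tokensWithUnk tokens out) := by unfold Spec_tokensWithUnk; infer_instance

-- ===== CLAIM (what is proved, stated in full; the proofs are below) =====
def Claim_equal_tokensWithUnk : Prop := ∀ (tokens : List String), Dom_tokensWithUnk tokens → Spec_tokensWithUnk tokens (tokensWithUnk tokens)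

-- ===== LEMMAS AND PROOFS =====

-- reference: one left-to-right marking pass
def pvMark (seen : PySem.Set String) : List String → List String
  | [] => []
  | t :: ts => (if seen.contains t then t else "UNK") :: pvMark (seen.add t) ts

-- the first-occurrence indices B's first pass produces, relative to a seen-set and a start index
def pvNewIdxs (seen : PySem.Set String) : List String → Int → List Int
  | [], _ => []
  | t :: ts, s =>
    if seen.contains t then pvNewIdxs seen ts (s + 1)
    else s :: pvNewIdxs (seen.add t) ts (s + 1)

theorem pvNewIdxs_ge : ∀ (l : List String) (seen : PySem.Set String) (s : Int),
    ∀ x ∈ pvNewIdxs seen l s, s ≤ x := by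
  intro l
  induction l with
  | nil => intro seen s x hx; simp [pvNewIdxs] at hx
  | cons t ts ih =>
    intro seen s x hx
    by_cases hc : seen.contains t = true
    · have hm : t ∈ seen := List.contains_iff_mem.mp hc
      have he : pvNewIdxs seen (t :: ts) s = pvNewIdxs seen ts (s + 1) := by
        simp [pvNewIdxs, hm]
      rw [he] at hx
      have := ih seen (s + 1) x hx; omega
    · have hm : t ∉ seen := fun h => hc (List.contains_iff_mem.mpr h)
      have he : pvNewIdxs seen (t :: ts) s = s :: pvNewIdxs (seen.add t) ts (s + 1) := by
        simp [pvNewIdxs, hm]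
      rw [he] at hx
      rcases List.mem_cons.mp hx with h | h
      · omega
      · have := ih (seen.add t) (s + 1) x h; omega

theorem pvGetD_append_len (done : List String) (t : String) (ts : List String) (d : String) :
    (done ++ t :: ts).getD done.length d = t := by
  induction done with
  | nil => rfl
  | cons a as _ => simp

theorem pvSet_append_len (done : List String) (t v : String) (ts : List String) :
    (done ++ t :: ts).set done.length v = done ++ v :: ts := by
  induction done with
  | nil => rfl
  | cons a as ih => simp [ih]

-- invariant of A's loop: folding indices [|done|, |done|+|l|) over done ++ l marks l
theorem pvA_inv : ∀ (l done : List String) (seen : PySem.Set String),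
    ((PySem.List.pyRange (done.length : Int) ((done.length : Int) + l.length) 1).foldl
      (fun (st : PySem.Set String × List String) i =>
        let t := PySem.List.pyGetD st.2 i ""
        if st.1.contains t then st
        else (st.1.add t, PySem.List.pySetD st.2 i "UNK"))
      (seen, done ++ l))
    = (seen.update l, done ++ pvMark seen l) := by
  intro l
  induction l with
  | nil =>
    intro done seen
    rw [PySem.List.pyRange_one_eq_nil (by simp)]
    simp [pvMark]
  | cons t ts ih =>
    intro done seen
    rw [PySem.List.pyRange_one_cons (by simp)]
    simp only [List.foldl_cons]
    have hget : PySem.List.pyGetD (done ++ t :: ts) (done.length : Int) "" = t := by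
      rw [PySem.List.pyGetD_natCast]; exact pvGetD_append_len done t ts ""
    have hset : PySem.List.pySetD (done ++ t :: ts) (done.length : Int) "UNK"
        = done ++ "UNK" :: ts := by
      rw [PySem.List.pySetD_natCast]; exact pvSet_append_len done t "UNK" ts
    simp only [hget, hset]
    by_cases hc : seen.contains t = true
    · have hm : t ∈ seen := List.contains_iff_mem.mp hc
      rw [if_pos hc]
      have h1 : (done.length : Int) + 1 = ((done ++ [t]).length : Int) := by simp
      have h2 : (done.length : Int) + ((t :: ts).length : Int)
          = ((done ++ [t]).length : Int) + (ts.length : Int) := by simp; ring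
      rw [h1, h2]
      have h3 : done ++ t :: ts = (done ++ [t]) ++ ts := by simp
      rw [h3, ih (done ++ [t]) seen]
      have hadd : seen.add t = seen := by simp [PySem.Set.add, hm]
      have hmk : pvMark seen (t :: ts) = t :: pvMark seen ts := by
        simp [pvMark, hm]
      have hup : seen.update (t :: ts) = seen.update ts := by
        show (seen.add t).update ts = seen.update ts
        rw [hadd]
      rw [hmk, hup]
      simp
    · have hm : t ∉ seen := fun h => hc (List.contains_iff_mem.mpr h)
      rw [if_neg hc]
      have h1 : (done.length : Int) + 1 = ((done ++ ["UNK"]).length : Int) := by simp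
      have h2 : (done.length : Int) + ((t :: ts).length : Int)
          = ((done ++ ["UNK"]).length : Int) + (ts.length : Int) := by simp; ring
      rw [h1, h2]
      have h3 : done ++ "UNK" :: ts = (done ++ ["UNK"]) ++ ts := by simp
      rw [h3, ih (done ++ ["UNK"]) (seen.add t)]
      have hmk : pvMark seen (t :: ts) = "UNK" :: pvMark (seen.add t) ts := by
        simp [pvMark, hm]
      rw [hmk]
      have hup : seen.update (t :: ts) = (seen.add t).update ts := rfl
      rw [hup]
      simp

-- invariant of B's first pass
theorem pvB_inv : ∀ (l : List String) (s : Int) (seen : PySem.Set String) (fi : PySem.Set Int),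
    (∀ x ∈ fi, x < s) →
    ((PySem.List.enumerate l s).foldl
      (fun (st : PySem.Set String × PySem.Set Int) it =>
        if st.1.contains it.2 then st
        else (st.1.add it.2, st.2.add it.1))
      (seen, fi))
    = (seen.update l, fi ++ pvNewIdxs seen l s) := by
  intro l
  induction l with
  | nil => intro s seen fi _; simp [PySem.List.enumerate_nil, pvNewIdxs]
  | cons t ts ih =>
    intro s seen fi hfi
    rw [PySem.List.enumerate_cons, List.foldl_cons]
    have hinit : ((if (seen, fi).1.contains (s, t).2 = true then (seen, fi)
        else ((seen, fi).1.add (s, t).2, (seen, fi).2.add (s, t).1)) : PySem.Set String × PySem.Set Int)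
        = if seen.contains t = true then (seen, fi) else (seen.add t, fi.add s) := rfl
    rw [hinit]
    by_cases hc : seen.contains t = true
    · have hm : t ∈ seen := List.contains_iff_mem.mp hc
      rw [if_pos hc, ih (s + 1) seen fi (fun x hx => by have := hfi x hx; omega)]
      have hadd : seen.add t = seen := by simp [PySem.Set.add, hm]
      have hup : seen.update (t :: ts) = seen.update ts := by
        show (seen.add t).update ts = seen.update ts
        rw [hadd]
      have hlist : pvNewIdxs seen (t :: ts) s = pvNewIdxs seen ts (s + 1) := by
        simp [pvNewIdxs, hm]
      simp [hup, hlist]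
    · have hm : t ∉ seen := fun h => hc (List.contains_iff_mem.mpr h)
      rw [if_neg hc]
      have hsm : s ∉ fi := fun h => by have := hfi s h; omega
      have haddfi : fi.add s = fi ++ [s] := by simp [PySem.Set.add, hsm]
      rw [haddfi, ih (s + 1) (seen.add t) (fi ++ [s])
        (fun x hx => by
          rcases List.mem_append.mp hx with h | h
          · have := hfi x h; omega
          · simp at h; omega)]
      have hup : seen.update (t :: ts) = (seen.add t).update ts := rfl
      have hlist : pvNewIdxs seen (t :: ts) s = s :: pvNewIdxs (seen.add t) ts (s + 1) := by
        simp [pvNewIdxs, hm]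
      rw [hup, hlist]
      simp

-- B's second pass against a fixed index set that splits as pre ++ pvNewIdxs seen l s
theorem pvB_map : ∀ (l : List String) (s : Int) (seen : PySem.Set String) (pre : List Int),
    (∀ x ∈ pre, x < s) →
    (PySem.List.enumerate l s).map
      (fun it => if (pre ++ pvNewIdxs seen l s).contains it.1 then "UNK" else it.2)
    = pvMark seen l := by
  intro l
  induction l with
  | nil => intro s seen pre _; simp [PySem.List.enumerate_nil, pvMark]
  | cons t ts ih =>
    intro s seen pre hpre
    rw [PySem.List.enumerate_cons, List.map_cons]
    by_cases hc : seen.contains t = true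
    · have hm : t ∈ seen := List.contains_iff_mem.mp hc
      have hlist : pvNewIdxs seen (t :: ts) s = pvNewIdxs seen ts (s + 1) := by
        simp [pvNewIdxs, hm]
      have hnots : (pre ++ pvNewIdxs seen (t :: ts) s).contains s = false := by
        rw [Bool.eq_false_iff]
        intro h
        have hmem := List.contains_iff_mem.mp h
        rcases List.mem_append.mp hmem with h1 | h1
        · have := hpre s h1; omega
        · rw [hlist] at h1; have := pvNewIdxs_ge ts seen (s + 1) s h1; omega
      rw [hnots, if_neg (by decide : ¬ (false = true))]
      have hadd : seen.add t = seen := by simp [PySem.Set.add, hm]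
      have hmk : pvMark seen (t :: ts) = t :: pvMark seen ts := by
        simp [pvMark, hm]
      rw [hmk, hlist]
      congr 1
      have := ih (s + 1) seen pre (fun x hx => by have := hpre x hx; omega)
      exact this
    · have hm : t ∉ seen := fun h => hc (List.contains_iff_mem.mpr h)
      have hlist : pvNewIdxs seen (t :: ts) s = s :: pvNewIdxs (seen.add t) ts (s + 1) := by
        simp [pvNewIdxs, hm]
      have hs : (pre ++ pvNewIdxs seen (t :: ts) s).contains s = true := by
        rw [List.contains_iff_mem, hlist]; simp
      rw [hs, if_pos rfl]
      have hmk : pvMark seen (t :: ts) = "UNK" :: pvMark (seen.add t) ts := by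
        simp [pvMark, hm]
      rw [hmk]
      congr 1
      have hsplit : pre ++ pvNewIdxs seen (t :: ts) s
          = (pre ++ [s]) ++ pvNewIdxs (seen.add t) ts (s + 1) := by
        rw [hlist]; simp
      rw [hsplit]
      exact ih (s + 1) (seen.add t) (pre ++ [s])
        (fun x hx => by
          rcases List.mem_append.mp hx with h | h
          · have := hpre x h; omega
          · simp at h; omega)

theorem pvA_eq_mark (tokens : List String) : tokensWithUnk tokens = pvMark PySem.Set.empty tokens := by
  unfold tokensWithUnk
  have := pvA_inv tokens [] PySem.Set.empty
  simp only [List.length_nil, Int.natCast_zero, zero_add, List.nil_append] at this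
  simp only [this]

theorem pvB_eq_mark (tokens : List String) : tokensWithUnk_alt tokens = pvMark PySem.Set.empty tokens := by
  unfold tokensWithUnk_alt
  have h1 := pvB_inv tokens 0 PySem.Set.empty PySem.Set.empty (by intro x hx; simp [PySem.Set.empty] at hx)
  simp only [h1]
  have h2 := pvB_map tokens 0 PySem.Set.empty [] (by intro x hx; simp at hx)
  simp only [List.nil_append] at h2
  exact h2

-- ===== VERDICT (by name: the statement is the Claim_ definition above) =====
theorem tokensWithUnk_spec : Claim_equal_tokensWithUnk := by
  intro tokens _
  show tokensWithUnk tokens = tokensWithUnk_alt tokens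
  rw [pvA_eq_mark, pvB_eq_mark]
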